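-- pv_equiv track=rewrite | github.com/danashehri/Sudoku-Solver-Using-Backtracking-Algorithm | sudoku.py | subgrids
-- ===== SOURCE A (Python) =====
-- def subgrids(board):
--     # determine the subgrids in the board
--     # print_board(board)
--     subgrids_all = []
--     subgrid1_keys = ["A1", "A2", "A3", "B1", "B2", "B3", "C1", "C2", "C3"]
--     subgrid1 = {key: value for key, value in board.items() if key in subgrid1_keys}
--     subgrid2_keys = ["A4", "A5", "A6", "B4", "B5", "B6", "C4", "C5", "C6"]
--     subgrid2 = {key: value for key, value in board.items() if key in subgrid2_keys}
--     subgrid3_keys = ["A7", "A8", "A9", "B7", "B8", "B9", "C7", "C8", "C9"]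
--     subgrid3 = {key: value for key, value in board.items() if key in subgrid3_keys}
--
--     subgrid4_keys = ["D1", "D2", "D3", "E1", "E2", "E3", "F1", "F2", "F3"]
--     subgrid4 = {key: value for key, value in board.items() if key in subgrid4_keys}
--     subgrid5_keys = ["D4", "D5", "D6", "E4", "E5", "E6", "F4", "F5", "F6"]
--     subgrid5 = {key: value for key, value in board.items() if key in subgrid5_keys}
--     subgrid6_keys = ["D7", "D8", "D9", "E7", "E8", "E9", "F7", "F8", "F9"]
--     subgrid6 = {key: value for key, value in board.items() if key in subgrid6_keys}
--
--     subgrid7_keys = ["G1", "G2", "G3", "H1", "H2", "H3", "I1", "I2", "I3"]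
--     subgrid7 = {key: value for key, value in board.items() if key in subgrid7_keys}
--     subgrid8_keys = ["G4", "G5", "G6", "H4", "H5", "H6", "I4", "I5", "I6"]
--     subgrid8 = {key: value for key, value in board.items() if key in subgrid8_keys}
--     subgrid9_keys = ["G7", "G8", "G9", "H7", "H8", "H9", "I7", "I8", "I9"]
--     subgrid9 = {key: value for key, value in board.items() if key in subgrid9_keys}
--     subgrids_all.extend([subgrid1, subgrid2, subgrid3, subgrid4, subgrid5, subgrid6, subgrid7, subgrid8,
--                          subgrid9])  # list of dictionaries
--     return subgrids_all
-- ===== SOURCE B (Python) =====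
-- def subgrids(board):
--     # One pass over the board: compute each cell's subgrid index arithmetically
--     # (65 = ord('A'), 49 = ord('1')) instead of filtering the whole board nine times.
--     grids = [{} for _ in range(9)]
--     for key, value in board.items():
--         if len(key) == 2 and 65 <= ord(key[0]) <= 73 and 49 <= ord(key[1]) <= 57:
--             grids[(ord(key[0]) - 65) // 3 * 3 + (ord(key[1]) - 49) // 3][key] = value
--     return grids
-- ===== Notes on version B (the rewrite author's own statement) =====
-- stated objective: faster
-- what changed: B replaces A's nine separate dict-comprehension passes (each doing a linear scan of a 9-element key list per cell) with a single pass over board.items() that computes each cell's subgrid index arithmetically from its row and column characters.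
import Mathlib
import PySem

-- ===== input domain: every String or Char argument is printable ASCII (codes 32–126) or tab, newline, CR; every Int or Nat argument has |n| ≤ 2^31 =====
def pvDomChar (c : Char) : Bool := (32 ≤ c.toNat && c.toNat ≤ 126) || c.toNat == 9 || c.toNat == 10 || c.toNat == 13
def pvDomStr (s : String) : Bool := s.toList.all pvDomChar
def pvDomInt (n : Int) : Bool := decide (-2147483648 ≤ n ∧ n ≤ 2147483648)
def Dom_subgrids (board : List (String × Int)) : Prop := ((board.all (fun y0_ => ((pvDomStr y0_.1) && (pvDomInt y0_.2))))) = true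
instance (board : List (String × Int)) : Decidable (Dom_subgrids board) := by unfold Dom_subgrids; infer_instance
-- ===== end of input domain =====

-- B does one pass with an arithmetic subgrid index instead of A's nine filtering passes
-- (constant-factor speedup; return value only — neither version mutates its argument).
-- board is a Python dict, so its association list has distinct keys and each dict
-- comprehension / dict assignment below is an order-preserving filter / append.

-- ===== PORT A =====
def subgrids (board : List (String × Int)) : List (List (String × Int)) :=
  let subgrids_all : List (List (String × Int)) := []
  let subgrid1_keys : List String := ["A1", "A2", "A3", "B1", "B2", "B3", "C1", "C2", "C3"]
  let subgrid1 := board.filter (fun kv => subgrid1_keys.contains kv.1)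
  let subgrid2_keys : List String := ["A4", "A5", "A6", "B4", "B5", "B6", "C4", "C5", "C6"]
  let subgrid2 := board.filter (fun kv => subgrid2_keys.contains kv.1)
  let subgrid3_keys : List String := ["A7", "A8", "A9", "B7", "B8", "B9", "C7", "C8", "C9"]
  let subgrid3 := board.filter (fun kv => subgrid3_keys.contains kv.1)
  let subgrid4_keys : List String := ["D1", "D2", "D3", "E1", "E2", "E3", "F1", "F2", "F3"]
  let subgrid4 := board.filter (fun kv => subgrid4_keys.contains kv.1)
  let subgrid5_keys : List String := ["D4", "D5", "D6", "E4", "E5", "E6", "F4", "F5", "F6"]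
  let subgrid5 := board.filter (fun kv => subgrid5_keys.contains kv.1)
  let subgrid6_keys : List String := ["D7", "D8", "D9", "E7", "E8", "E9", "F7", "F8", "F9"]
  let subgrid6 := board.filter (fun kv => subgrid6_keys.contains kv.1)
  let subgrid7_keys : List String := ["G1", "G2", "G3", "H1", "H2", "H3", "I1", "I2", "I3"]
  let subgrid7 := board.filter (fun kv => subgrid7_keys.contains kv.1)
  let subgrid8_keys : List String := ["G4", "G5", "G6", "H4", "H5", "H6", "I4", "I5", "I6"]
  let subgrid8 := board.filter (fun kv => subgrid8_keys.contains kv.1)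
  let subgrid9_keys : List String := ["G7", "G8", "G9", "H7", "H8", "H9", "I7", "I8", "I9"]
  let subgrid9 := board.filter (fun kv => subgrid9_keys.contains kv.1)
  subgrids_all ++ [subgrid1, subgrid2, subgrid3, subgrid4, subgrid5, subgrid6, subgrid7,
    subgrid8, subgrid9]

-- ===== PORT B =====
-- 'len(key) == 2 and 65 <= ord(key[0]) <= 73 and 49 <= ord(key[1]) <= 57' and the index
-- arithmetic, on the character-list side (exact: len/ord on ASCII strings).
def pvCellIndexChars (cs : List Char) : Option Nat :=
  match cs with
  | [r, c] =>
      if 65 ≤ r.toNat ∧ r.toNat ≤ 73 ∧ 49 ≤ c.toNat ∧ c.toNat ≤ 57 then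
        some ((r.toNat - 65) / 3 * 3 + (c.toNat - 49) / 3)
      else none
  | _ => none

def pvCellIndex (key : String) : Option Nat := pvCellIndexChars key.toList

def subgrids_alt (board : List (String × Int)) : List (List (String × Int)) :=
  board.foldl
    (fun grids kv =>
      match pvCellIndex kv.1 with
      | some i => grids.modify i (fun g => g ++ [kv])  -- grids[i][key] = value (key fresh: board is a dict)
      | none => grids)
    [[], [], [], [], [], [], [], [], []]

-- ===== PRECONDITION & SPEC =====
def Spec_subgrids (board : List (String × Int)) (out : List (List (String × Int))) : Prop := out = subgrids_alt board
instance (board : List (String × Int)) (out : List (List (String × Int))) : Decidable (Spec_subgrids board out) := by unfold Spec_subgrids; infer_instance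

-- ===== CLAIM (what is proved, stated in full; the proofs are below) =====
def Claim_equal_subgrids : Prop := ∀ (board : List (String × Int)), Dom_subgrids board → Spec_subgrids board (subgrids board)

-- ===== LEMMAS AND PROOFS =====

-- the nine subgrids' key lists, as character lists, indexed by subgrid number
def pvCharKeys (n : Nat) : List (List Char) :=
  ([[['A', '1'], ['A', '2'], ['A', '3'], ['B', '1'], ['B', '2'], ['B', '3'], ['C', '1'], ['C', '2'], ['C', '3']],
   [['A', '4'], ['A', '5'], ['A', '6'], ['B', '4'], ['B', '5'], ['B', '6'], ['C', '4'], ['C', '5'], ['C', '6']],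
   [['A', '7'], ['A', '8'], ['A', '9'], ['B', '7'], ['B', '8'], ['B', '9'], ['C', '7'], ['C', '8'], ['C', '9']],
   [['D', '1'], ['D', '2'], ['D', '3'], ['E', '1'], ['E', '2'], ['E', '3'], ['F', '1'], ['F', '2'], ['F', '3']],
   [['D', '4'], ['D', '5'], ['D', '6'], ['E', '4'], ['E', '5'], ['E', '6'], ['F', '4'], ['F', '5'], ['F', '6']],
   [['D', '7'], ['D', '8'], ['D', '9'], ['E', '7'], ['E', '8'], ['E', '9'], ['F', '7'], ['F', '8'], ['F', '9']],
   [['G', '1'], ['G', '2'], ['G', '3'], ['H', '1'], ['H', '2'], ['H', '3'], ['I', '1'], ['I', '2'], ['I', '3']],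
   [['G', '4'], ['G', '5'], ['G', '6'], ['H', '4'], ['H', '5'], ['H', '6'], ['I', '4'], ['I', '5'], ['I', '6']],
   [['G', '7'], ['G', '8'], ['G', '9'], ['H', '7'], ['H', '8'], ['H', '9'], ['I', '7'], ['I', '8'], ['I', '9']]] :
     List (List (List Char))).getD n []

set_option maxHeartbeats 1600000 in
lemma pv_mem_cellIndex : ∀ n : Nat, n < 9 → ∀ cs ∈ pvCharKeys n, pvCellIndexChars cs = some n := by
  decide

lemma pv_inbounds_mem : ∀ a : Nat, a < 9 → ∀ b : Nat, b < 9 →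
    [Char.ofNat (65 + a), Char.ofNat (49 + b)] ∈ pvCharKeys (a / 3 * 3 + b / 3) := by
  decide

lemma pv_cell_some_mem (cs : List Char) (n : Nat) (h : pvCellIndexChars cs = some n) :
    cs ∈ pvCharKeys n := by
  match cs with
  | [] => simp [pvCellIndexChars] at h
  | [r] => simp [pvCellIndexChars] at h
  | r :: c :: d :: t => simp [pvCellIndexChars] at h
  | [r, c] =>
    simp only [pvCellIndexChars] at h
    split_ifs at h with hb
    · obtain ⟨h1, h2, h3, h4⟩ := hb
      have hn : (r.toNat - 65) / 3 * 3 + (c.toNat - 49) / 3 = n := by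
        exact Option.some.inj h
      have ha : r.toNat - 65 < 9 := by omega
      have hbn : c.toNat - 49 < 9 := by omega
      have hr : Char.ofNat (65 + (r.toNat - 65)) = r := by
        rw [show 65 + (r.toNat - 65) = r.toNat from by omega]; exact Char.ofNat_toNat r
      have hc : Char.ofNat (49 + (c.toNat - 49)) = c := by
        rw [show 49 + (c.toNat - 49) = c.toNat from by omega]; exact Char.ofNat_toNat c
      have key := pv_inbounds_mem (r.toNat - 65) ha (c.toNat - 49) hbn
      rw [hr, hc, hn] at key
      exact key

lemma pv_mem_keys_iff_toList (keys : List String) (k : String) :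
    k ∈ keys ↔ k.toList ∈ keys.map String.toList := by
  constructor
  · intro h; exact List.mem_map_of_mem h
  · intro h
    obtain ⟨s, hs, he⟩ := List.mem_map.mp h
    rwa [← String.toList_inj.mp he]

lemma pv_filter_eq (keys : List String) (n : Nat) (hck : keys.map String.toList = pvCharKeys n)
    (hn : n < 9) (board : List (String × Int)) :
    board.filter (fun kv => decide (pvCellIndex kv.1 = some n)) =
      board.filter (fun kv => keys.contains kv.1) := by
  apply List.filter_congr
  intro kv _
  rw [List.contains_eq_mem, decide_eq_decide]
  rw [pv_mem_keys_iff_toList, hck]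
  exact ⟨fun h => pv_cell_some_mem _ _ h, fun h => pv_mem_cellIndex n hn _ h⟩

lemma pv_alt_fold (bs : List (String × Int)) (gs : List (List (String × Int))) (n : Nat) :
    (bs.foldl
      (fun grids kv =>
        match pvCellIndex kv.1 with
        | some i => grids.modify i (fun g => g ++ [kv])
        | none => grids) gs)[n]? =
    (gs[n]?).map (· ++ bs.filter (fun kv => decide (pvCellIndex kv.1 = some n))) := by
  induction bs generalizing gs with
  | nil => simp
  | cons kv bs ih =>
    simp only [List.foldl_cons, List.filter_cons]
    cases h : pvCellIndex kv.1 with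
    | none => rw [ih]; simp
    | some i =>
      rw [ih, List.getElem?_modify]
      by_cases hin : i = n
      · subst hin
        cases gs[i]? <;> simp
      · cases gs[n]? <;> simp [hin]

-- ===== VERDICT (by name: the statement is the Claim_ definition above) =====
theorem subgrids_spec : Claim_equal_subgrids := by
  intro board _
  unfold Spec_subgrids subgrids subgrids_alt
  apply List.ext_getElem?
  intro n
  rw [pv_alt_fold]
  match n, (by omega : n < 9 ∨ 9 ≤ n) with
  | 0, _ => simpa using (pv_filter_eq ["A1", "A2", "A3", "B1", "B2", "B3", "C1", "C2", "C3"] 0 (by decide) (by omega) board).symm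
  | 1, _ => simpa using (pv_filter_eq ["A4", "A5", "A6", "B4", "B5", "B6", "C4", "C5", "C6"] 1 (by decide) (by omega) board).symm
  | 2, _ => simpa using (pv_filter_eq ["A7", "A8", "A9", "B7", "B8", "B9", "C7", "C8", "C9"] 2 (by decide) (by omega) board).symm
  | 3, _ => simpa using (pv_filter_eq ["D1", "D2", "D3", "E1", "E2", "E3", "F1", "F2", "F3"] 3 (by decide) (by omega) board).symm
  | 4, _ => simpa using (pv_filter_eq ["D4", "D5", "D6", "E4", "E5", "E6", "F4", "F5", "F6"] 4 (by decide) (by omega) board).symm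
  | 5, _ => simpa using (pv_filter_eq ["D7", "D8", "D9", "E7", "E8", "E9", "F7", "F8", "F9"] 5 (by decide) (by omega) board).symm
  | 6, _ => simpa using (pv_filter_eq ["G1", "G2", "G3", "H1", "H2", "H3", "I1", "I2", "I3"] 6 (by decide) (by omega) board).symm
  | 7, _ => simpa using (pv_filter_eq ["G4", "G5", "G6", "H4", "H5", "H6", "I4", "I5", "I6"] 7 (by decide) (by omega) board).symm
  | 8, _ => simpa using (pv_filter_eq ["G7", "G8", "G9", "H7", "H8", "H9", "I7", "I8", "I9"] 8 (by decide) (by omega) board).symm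
  | (m + 9), _ => simp
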